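-- pv_equiv track=rewrite | github.com/Albina-X/project_01 | lvl_2/task_2.2.py | quarter_of
-- ===== SOURCE A (Python) =====
-- def quarter_of(month):
--     '''Функция ищет номер квартала по номеру месяца'''
--     list_of_quarters = {
--         1: (1, 2, 3),
--         2: (4, 5, 6),
--         3: (7, 8, 9),
--         4: (10, 11, 12)
--     }
--
--     for quarter, months in list_of_quarters.items():
--         if month in months:
--             return quarter
--
--     return None
-- ===== SOURCE B (Python) =====
-- def quarter_of(month):
--     '''Функция ищет номер квартала по номеру месяца'''
--     if month in range(1, 13):
--         return (int(month) - 1) // 3 + 1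
--     return None
-- ===== Notes on version B (the rewrite author's own statement) =====
-- stated objective: simpler
-- what changed: Replaces the dict-of-tuples scan with the closed-form arithmetic (month-1)//3 + 1 guarded by a single range membership test.
import Mathlib
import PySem

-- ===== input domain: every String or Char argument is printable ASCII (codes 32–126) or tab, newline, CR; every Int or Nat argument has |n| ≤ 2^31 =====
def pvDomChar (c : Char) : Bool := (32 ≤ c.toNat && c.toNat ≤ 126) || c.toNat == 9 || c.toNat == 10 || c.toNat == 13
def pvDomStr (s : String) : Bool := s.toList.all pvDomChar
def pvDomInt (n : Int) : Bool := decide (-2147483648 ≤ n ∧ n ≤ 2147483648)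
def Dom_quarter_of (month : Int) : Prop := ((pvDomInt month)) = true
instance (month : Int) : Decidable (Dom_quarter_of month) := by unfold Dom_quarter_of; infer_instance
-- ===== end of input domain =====

-- B replaces A's scan over a dict of quarter → month-tuples with the closed form (month-1)//3 + 1
-- behind one range-membership guard; equivalence of return values is proved on all Int inputs.

-- ===== PORT A =====
-- A's for-loop over list_of_quarters.items(): first pair whose tuple contains month wins.
def pvQuarterLoop (month : Int) : List (Int × List Int) → Option Int
  | [] => none
  | (quarter, months) :: rest =>
      if month ∈ months then some quarter else pvQuarterLoop month rest

def quarter_of (month : Int) : Option Int :=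
  let list_of_quarters : List (Int × List Int) :=
    [(1, [1, 2, 3]), (2, [4, 5, 6]), (3, [7, 8, 9]), (4, [10, 11, 12])]
  pvQuarterLoop month list_of_quarters

-- ===== PORT B =====
def quarter_of_alt (month : Int) : Option Int :=
  if month ∈ PySem.List.pyRange 1 13 1 then
    some (PySem.Int.floordiv (month - 1) 3 + 1)
  else
    none

-- ===== PRECONDITION & SPEC =====
def Spec_quarter_of (month : Int) (out : Option Int) : Prop := out = quarter_of_alt month
instance (month : Int) (out : Option Int) : Decidable (Spec_quarter_of month out) := by unfold Spec_quarter_of; infer_instance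

-- ===== CLAIM (what is proved, stated in full; the proofs are below) =====
def Claim_equal_quarter_of : Prop := ∀ (month : Int), Dom_quarter_of month → Spec_quarter_of month (quarter_of month)

-- ===== LEMMAS AND PROOFS =====

-- ===== VERDICT (by name: the statement is the Claim_ definition above) =====
theorem quarter_of_spec : Claim_equal_quarter_of := by
  intro month _
  unfold Spec_quarter_of quarter_of quarter_of_alt
  simp only [pvQuarterLoop]
  by_cases h : 1 ≤ month ∧ month ≤ 12
  · obtain ⟨h1, h2⟩ := h
    interval_cases month <;> decide
  · split_ifs <;> first | rfl | (exfalso; simp only [List.mem_cons, List.not_mem_nil, PySem.List.mem_pyRange_one, or_false, not_or] at *; omega)
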